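-- pv_equiv track=rewrite | github.com/mgi25/ai_trading_employee | versions/bot_v1.py | price_between_last_buy_sell
-- ===== SOURCE A (Python) =====
-- def price_between_last_buy_sell(entry_sequence, price):
--     buys  = [e[0] for e in entry_sequence if e[1] == 'BUY']
--     sells = [e[0] for e in entry_sequence if e[1] == 'SELL']
--     if not buys or not sells:
--         return False
--     min_buy  = min(buys)
--     max_sell = max(sells)
--     low  = min(min_buy, max_sell)
--     high = max(min_buy, max_sell)
--     return low < price < high
-- ===== SOURCE B (Python) =====
-- def price_between_last_buy_sell(entry_sequence, price):
--     # Flag-based reformulation: price lies strictly between the min buy and the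
--     # max sell (in either order) iff both sides exist and either some buy is
--     # below price and some sell above it, or every buy is above price and every
--     # sell below it.  No extrema are ever computed.
--     has_buy = False
--     has_sell = False
--     buy_below = False       # exists a BUY price < price
--     sell_above = False      # exists a SELL price > price
--     buys_above = True       # every BUY price > price
--     sells_below = True      # every SELL price < price
--     for p, side in entry_sequence:
--         if side == 'BUY':
--             has_buy = True
--             if p < price:
--                 buy_below = True
--             if p <= price:
--                 buys_above = False
--         elif side == 'SELL':
--             has_sell = True
--             if p > price:
--                 sell_above = True
--             if p >= price:
--                 sells_below = False
--     if not (has_buy and has_sell):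
--         return False
--     return (buy_below and sell_above) or (buys_above and sells_below)
-- ===== Notes on version B (the rewrite author's own statement) =====
-- stated objective: alternative
-- what changed: Replaces computing min(buys)/max(sells) and a min/max swap with a single pass over entry_sequence maintaining six boolean flags: the betweenness test becomes (some buy < price and some sell > price) or (all buys > price and all sells < price), so no extrema or intermediate lists are ever built.
import Mathlib
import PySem

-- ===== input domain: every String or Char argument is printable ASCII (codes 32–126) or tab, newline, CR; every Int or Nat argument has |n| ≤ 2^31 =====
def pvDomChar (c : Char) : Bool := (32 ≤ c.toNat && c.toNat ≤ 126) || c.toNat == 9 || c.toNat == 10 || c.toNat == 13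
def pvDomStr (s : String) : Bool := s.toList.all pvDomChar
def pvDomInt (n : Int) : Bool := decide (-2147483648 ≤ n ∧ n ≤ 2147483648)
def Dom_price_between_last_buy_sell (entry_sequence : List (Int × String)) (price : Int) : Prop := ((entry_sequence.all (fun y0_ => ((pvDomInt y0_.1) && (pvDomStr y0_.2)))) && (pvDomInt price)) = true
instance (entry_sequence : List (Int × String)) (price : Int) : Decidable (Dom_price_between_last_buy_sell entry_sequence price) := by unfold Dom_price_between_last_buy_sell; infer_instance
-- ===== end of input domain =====

-- B replaces A's min(buys)/max(sells) + min/max swap with a single flag pass: the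
-- betweenness test becomes "(some buy < price and some sell > price) or (all buys >
-- price and all sells < price)" — objective: alternative, no extrema computed.


-- ===== PORT A =====
def price_between_last_buy_sell (entry_sequence : List (Int × String)) (price : Int) : Bool :=
  let buys := (entry_sequence.filter (fun e => e.2 == "BUY")).map (fun e => e.1)
  let sells := (entry_sequence.filter (fun e => e.2 == "SELL")).map (fun e => e.1)
  if buys.isEmpty || sells.isEmpty then false
  else
    match PySem.List.min? buys (fun x => x), PySem.List.max? sells (fun x => x) with
    | some min_buy, some max_sell =>
      let low := min min_buy max_sell
      let high := max min_buy max_sell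
      decide (low < price ∧ price < high)
    | _, _ => false

-- ===== PORT B =====
-- one step of B's flag loop: state = (has_buy, has_sell, buy_below, sell_above, buys_above, sells_below)
def pbFlags (price : Int) (st : Bool × Bool × Bool × Bool × Bool × Bool) (e : Int × String) :
    Bool × Bool × Bool × Bool × Bool × Bool :=
  if e.2 == "BUY" then
    (true, st.2.1,
     st.2.2.1 || decide (e.1 < price), st.2.2.2.1,
     st.2.2.2.2.1 && decide (price < e.1), st.2.2.2.2.2)
  else if e.2 == "SELL" then
    (st.1, true,
     st.2.2.1, st.2.2.2.1 || decide (price < e.1),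
     st.2.2.2.2.1, st.2.2.2.2.2 && decide (e.1 < price))
  else st

def price_between_last_buy_sell_alt (entry_sequence : List (Int × String)) (price : Int) : Bool :=
  let st := entry_sequence.foldl (pbFlags price) (false, false, false, false, true, true)
  if !(st.1 && st.2.1) then false
  else (st.2.2.1 && st.2.2.2.1) || (st.2.2.2.2.1 && st.2.2.2.2.2)

-- ===== PRECONDITION & SPEC =====
def Spec_price_between_last_buy_sell (entry_sequence : List (Int × String)) (price : Int) (out : Bool) : Prop := out = price_between_last_buy_sell_alt entry_sequence price
instance (entry_sequence : List (Int × String)) (price : Int) (out : Bool) : Decidable (Spec_price_between_last_buy_sell entry_sequence price out) := by unfold Spec_price_between_last_buy_sell; infer_instance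

-- ===== CLAIM (what is proved, stated in full; the proofs are below) =====
def Claim_equal_price_between_last_buy_sell : Prop := ∀ (entry_sequence : List (Int × String)) (price : Int), Dom_price_between_last_buy_sell entry_sequence price → Spec_price_between_last_buy_sell entry_sequence price (price_between_last_buy_sell entry_sequence price)

-- ===== LEMMAS AND PROOFS =====

-- B's fold from any state equals the flags computed from A's filtered lists
theorem flags_eq (price : Int) (es : List (Int × String)) (st : Bool × Bool × Bool × Bool × Bool × Bool) :
    es.foldl (pbFlags price) st =
      (st.1 || !((es.filter (fun e => e.2 == "BUY")).map (fun e => e.1)).isEmpty,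
       st.2.1 || !((es.filter (fun e => e.2 == "SELL")).map (fun e => e.1)).isEmpty,
       st.2.2.1 || ((es.filter (fun e => e.2 == "BUY")).map (fun e => e.1)).any (fun p => decide (p < price)),
       st.2.2.2.1 || ((es.filter (fun e => e.2 == "SELL")).map (fun e => e.1)).any (fun p => decide (price < p)),
       st.2.2.2.2.1 && ((es.filter (fun e => e.2 == "BUY")).map (fun e => e.1)).all (fun p => decide (price < p)),
       st.2.2.2.2.2 && ((es.filter (fun e => e.2 == "SELL")).map (fun e => e.1)).all (fun p => decide (p < price))) := by
  induction es generalizing st with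
  | nil => simp
  | cons e t ih =>
    rw [List.foldl_cons, ih]
    by_cases hb : e.2 == "BUY"
    · have hs : ¬ (e.2 == "SELL") = true := by simp_all
      simp [hb, hs, pbFlags, Bool.or_assoc, Bool.and_assoc]
    · by_cases hsl : e.2 == "SELL"
      · simp [hb, hsl, pbFlags, Bool.or_assoc, Bool.and_assoc]
      · simp [hb, hsl, pbFlags]

theorem any_lt_eq (l : List Int) (m price : Int) (hmem : m ∈ l) (hmin : ∀ y ∈ l, m ≤ y) :
    l.any (fun p => decide (p < price)) = decide (m < price) := by
  by_cases h : m < price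
  · simp only [h, decide_true, List.any_eq_true]
    exact ⟨m, hmem, by simpa using h⟩
  · simp only [h, decide_false, List.any_eq_false]
    intro y hy
    have := hmin y hy; simp; omega
theorem all_gt_eq (l : List Int) (m price : Int) (hmem : m ∈ l) (hmin : ∀ y ∈ l, m ≤ y) :
    l.all (fun p => decide (price < p)) = decide (price < m) := by
  by_cases h : price < m
  · simp only [h, decide_true, List.all_eq_true]
    intro y hy; have := hmin y hy; simp; omega
  · simp only [h, decide_false, List.all_eq_false]
    exact ⟨m, hmem, by simpa using h⟩
theorem any_gt_eq (l : List Int) (m price : Int) (hmem : m ∈ l) (hmax : ∀ y ∈ l, y ≤ m) :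
    l.any (fun p => decide (price < p)) = decide (price < m) := by
  by_cases h : price < m
  · simp only [h, decide_true, List.any_eq_true]
    exact ⟨m, hmem, by simpa using h⟩
  · simp only [h, decide_false, List.any_eq_false]
    intro y hy; have := hmax y hy; simp; omega
theorem all_lt_eq (l : List Int) (m price : Int) (hmem : m ∈ l) (hmax : ∀ y ∈ l, y ≤ m) :
    l.all (fun p => decide (p < price)) = decide (m < price) := by
  by_cases h : m < price
  · simp only [h, decide_true, List.all_eq_true]
    intro y hy; have := hmax y hy; simp; omega
  · simp only [h, decide_false, List.all_eq_false]
    exact ⟨m, hmem, by simpa using h⟩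

theorem between_iff (mb ms price : Int) :
    (min mb ms < price ∧ price < max mb ms) ↔ ((mb < price ∧ price < ms) ∨ (price < mb ∧ ms < price)) := by
  rcases le_total mb ms with h | h
  · rw [min_eq_left h, max_eq_right h]; omega
  · rw [min_eq_right h, max_eq_left h]; omega

-- ===== VERDICT (by name: the statement is the Claim_ definition above) =====
theorem price_between_last_buy_sell_spec : Claim_equal_price_between_last_buy_sell := by
  intro es price _
  unfold Spec_price_between_last_buy_sell
  unfold price_between_last_buy_sell price_between_last_buy_sell_alt
  rw [flags_eq]
  simp only [Bool.false_or, Bool.true_and]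
  set B := (es.filter (fun e => e.2 == "BUY")).map (fun e => e.1) with hBdef
  set S := (es.filter (fun e => e.2 == "SELL")).map (fun e => e.1) with hSdef
  by_cases hB : B.isEmpty
  · simp [hB]
  · by_cases hS : S.isEmpty
    · simp [hS]
    · cases hm : PySem.List.min? B (fun x => x) with
      | none =>
        rw [PySem.List.min?_eq_none_iff] at hm
        rw [hm] at hB; simp at hB
      | some mb =>
        cases hx : PySem.List.max? S (fun x => x) with
        | none =>
          rw [PySem.List.max?_eq_none_iff] at hx
          rw [hx] at hS; simp at hS
        | some ms =>
          have hmbMem : mb ∈ B := PySem.List.min?_mem hm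
          have hmbMin : ∀ y ∈ B, mb ≤ y := fun y hy => PySem.List.min?_isMin hm y hy
          have hmsMem : ms ∈ S := PySem.List.max?_mem hx
          have hmsMax : ∀ y ∈ S, y ≤ ms := fun y hy => PySem.List.max?_isMax hx y hy
          simp only [hB, hS, Bool.or_self, Bool.false_eq_true, Bool.not_false,
            Bool.and_true, Bool.not_true]
          rw [any_lt_eq B mb price hmbMem hmbMin, all_gt_eq B mb price hmbMem hmbMin,
            any_gt_eq S ms price hmsMem hmsMax, all_lt_eq S ms price hmsMem hmsMax]
          
          rw [show (decide (min mb ms < price ∧ price < max mb ms)) =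
              ((decide (mb < price) && decide (price < ms)) || (decide (price < mb) && decide (ms < price))) from by
            simp only [← Bool.decide_and, ← Bool.decide_or, decide_eq_decide]
            exact between_iff mb ms price]
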